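-- pv_equiv track=rewrite | github.com/armijoalb/CRIP | Práctica 2/Golomb.py | Segundo_pos
-- ===== SOURCE A (Python) =====
-- from itertools import groupby
-- from collections import Counter
--
-- def Segundo_pos(seq):
--     while seq[0] == seq[-1]:
--         seq.append(seq.pop(0))
--
--     # obtenemos todas las rachas posibles que existen en la secuencia
--     runs = [list(g) for k, g in groupby(seq)]
--     # y contamos el número de rachas que hay para cada longitud
--     count = Counter(map(lambda x: len(x), runs))
--     # comprobamos si se cumple que #runs(k+1) == runs(k)
--     for i in range(1, len(count)):
--         if count[i] != count[i+1]:
--             if not count[i] == 2*count[i+1]: # en el caso de que el siguiente elemento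
--                 return False                 # no sea 1/2 veces más pequeño
--         else:
--             if not count[i] >= count[i+1] :
--                 return False
--     else:
--         # si todo va bien, devolvemos True
--         return True
-- ===== SOURCE B (Python) =====
-- def Segundo_pos(seq):
--     # Compute the wrap-around rotation offset in one scan, slice once,
--     # then count run lengths in a single pass (no repeated pop(0)).
--     # Note: A rotates seq in place; B does not mutate its argument.
--     v = seq[-1]
--     k = 0
--     while seq[k] == v:
--         k += 1
--     rot = seq[k:] + seq[:k]
--     counts = {}
--     run = 1
--     prev = rot[0]
--     for x in rot[1:]:
--         if x == prev:
--             run += 1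
--         else:
--             counts[run] = counts.get(run, 0) + 1
--             run = 1
--         prev = x
--     counts[run] = counts.get(run, 0) + 1
--     for i in range(1, len(counts)):
--         a = counts.get(i, 0)
--         b = counts.get(i + 1, 0)
--         if a != b and a != 2 * b:
--             return False
--     return True
-- ===== Notes on version B (the rewrite author's own statement) =====
-- stated objective: alternative
-- what changed: B computes the wrap-around rotation offset in one scan and slices once instead of repeatedly pop(0)/append, and counts run lengths in a single pass over the rotated list instead of materializing groupby runs and a Counter; the final check collapses to one condition per length. Pre_ excludes the empty list (A raises IndexError) and all-equal lists (A's rotation loop never terminates); B raises IndexError on both.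
-- outside the precondition, e.g. on Segundo_pos([]): A raises IndexError, B raises IndexError; on Segundo_pos([0]): A does not finish within the time limit, B raises IndexError; on Segundo_pos([5, 5]): A does not finish within the time limit, B raises IndexError
import Mathlib
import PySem

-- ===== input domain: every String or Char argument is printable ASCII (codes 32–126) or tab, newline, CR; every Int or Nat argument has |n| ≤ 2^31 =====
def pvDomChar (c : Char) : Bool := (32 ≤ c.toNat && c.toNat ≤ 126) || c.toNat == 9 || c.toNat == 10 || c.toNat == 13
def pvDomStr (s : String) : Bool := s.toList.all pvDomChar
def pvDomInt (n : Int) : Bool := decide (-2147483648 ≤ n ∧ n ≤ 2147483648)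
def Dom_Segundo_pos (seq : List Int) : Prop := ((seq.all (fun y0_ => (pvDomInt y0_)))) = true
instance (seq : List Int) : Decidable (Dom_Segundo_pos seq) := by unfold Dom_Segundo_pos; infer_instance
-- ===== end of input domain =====

-- B replaces A's repeated pop(0)/append rotation and groupby+Counter with a one-scan
-- rotation offset plus a single-pass run-length count (alternative algorithm).
-- A mutates its argument (rotates it in place); the equivalence proved here is about the
-- RETURN value only — B does not mutate.

-- ===== PORT A =====
-- while seq[0] == seq[-1]: seq.append(seq.pop(0))   (fuel makes the loop total; under
-- Pre_ the loop performs fewer than seq.length iterations, so the fuel never runs out)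
def rotA : Nat → List Int → List Int
  | 0, s => s
  | f+1, s =>
    match s with
    | [] => []                               -- Python raises IndexError here (outside Pre_)
    | x :: xs => if x = xs.getLastD x then rotA f (xs ++ [x]) else x :: xs

-- itertools.groupby, ported by hand (exact: maximal runs of equal adjacent elements)
def groupAux (p : Int) (cur : List Int) : List Int → List (List Int)
  | [] => [cur.reverse]
  | x :: xs => if x = p then groupAux x (x :: cur) xs else cur.reverse :: groupAux x [x] xs

def groupRuns : List Int → List (List Int)
  | [] => []
  | x :: xs => groupAux x [x] xs

-- the for-loop over range(1, len(count)) with its early returns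
def checkA (d : PySem.Dict Int Int) : List Int → Bool
  | [] => true
  | i :: rest =>
    if d.getD i 0 ≠ d.getD (i+1) 0 then
      if ¬ (d.getD i 0 = 2 * d.getD (i+1) 0) then false else checkA d rest
    else
      if ¬ (d.getD i 0 ≥ d.getD (i+1) 0) then false else checkA d rest

def Segundo_pos (seq : List Int) : Bool :=
  let s := rotA seq.length seq
  let runs := groupRuns s
  let count := PySem.Dict.counter (runs.map (fun r => (r.length : Int)))
  checkA count (PySem.List.pyRange 1 (count.size) 1)

-- ===== PORT B =====
-- while seq[k] == v: k += 1   (on an all-equal list Python raises IndexError at k = n;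
-- that input is outside Pre_, the Lean function just returns n there)
def prefixLen (v : Int) : List Int → Nat
  | [] => 0
  | x :: xs => if x = v then prefixLen v xs + 1 else 0

-- the single pass over rot[1:] with state (counts, run, prev); the trailing
-- counts[run] = counts.get(run, 0) + 1 is the base case
def countRuns (c : PySem.Dict Int Int) (run : Int) (prev : Int) : List Int → PySem.Dict Int Int
  | [] => c.insert run (c.getD run 0 + 1)
  | x :: xs =>
    if x = prev then countRuns c (run + 1) prev xs
    else countRuns (c.insert run (c.getD run 0 + 1)) 1 x xs

def checkB (d : PySem.Dict Int Int) : List Int → Bool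
  | [] => true
  | i :: rest =>
    if d.getD i 0 ≠ d.getD (i+1) 0 ∧ d.getD i 0 ≠ 2 * d.getD (i+1) 0 then false
    else checkB d rest

def Segundo_pos_alt (seq : List Int) : Bool :=
  match seq with
  | [] => false                              -- Python raises IndexError on seq[-1] (outside Pre_)
  | a :: as =>
    let v := as.getLastD a
    let k := prefixLen v (a :: as)
    let rot := (a :: as).drop k ++ (a :: as).take k
    match rot with
    | [] => false                            -- unreachable: rot of a nonempty list is nonempty
    | x :: xs =>
      let counts := countRuns PySem.Dict.empty 1 x xs
      checkB counts (PySem.List.pyRange 1 (counts.size) 1)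

-- ===== PRECONDITION & SPEC =====
-- Pre_ excludes only inputs on which A returns no value: the empty list (IndexError on
-- seq[0]) and lists whose elements are all equal (the rotation while-loop never ends).
def Pre_Segundo_pos (seq : List Int) : Prop :=
  seq ≠ [] ∧ ¬ (∀ y ∈ seq, y = seq.headI)
instance (seq : List Int) : Decidable (Pre_Segundo_pos seq) := by unfold Pre_Segundo_pos; infer_instance

def pvWitness_Segundo_pos : List Int := [1, 1, 2, 2, 1]

def Spec_Segundo_pos (seq : List Int) (out : Bool) : Prop := out = Segundo_pos_alt seq
instance (seq : List Int) (out : Bool) : Decidable (Spec_Segundo_pos seq out) := by unfold Spec_Segundo_pos; infer_instance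

-- ===== CLAIM (what is proved, stated in full; the proofs are below) =====
def Claim_equal_Segundo_pos : Prop := ∀ (seq : List Int), Dom_Segundo_pos seq → Pre_Segundo_pos seq → Spec_Segundo_pos seq (Segundo_pos seq)

-- ===== LEMMAS AND PROOFS =====

theorem Segundo_pos_witness_ok : Dom_Segundo_pos pvWitness_Segundo_pos ∧ Pre_Segundo_pos pvWitness_Segundo_pos := by
  constructor <;> decide

-- proof-side helper: the sequence of run lengths the single pass emits
def lensF (p : Int) (r : Int) : List Int → List Int
  | [] => [r]
  | x :: xs => if x = p then lensF p (r + 1) xs else r :: lensF x 1 xs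

theorem countRuns_eq_foldl (l : List Int) : ∀ (c : PySem.Dict Int Int) (r p : Int),
    countRuns c r p l = (lensF p r l).foldl (fun d n => d.insert n (d.getD n 0 + 1)) c := by
  induction l with
  | nil => intro c r p; simp [countRuns, lensF]
  | cons x xs ih =>
    intro c r p
    by_cases h : x = p <;> simp [countRuns, lensF, h, ih]

theorem groupAux_lens (xs : List Int) : ∀ (p : Int) (cur : List Int),
    (groupAux p cur xs).map (fun r => (r.length : Int)) = lensF p (cur.length : Int) xs := by
  induction xs with
  | nil => intro p cur; simp [groupAux, lensF]
  | cons x xs ih =>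
    intro p cur
    by_cases h : x = p
    · subst h
      simp [groupAux, lensF, ih]
    · simp [groupAux, lensF, h, ih]

theorem checkA_eq_checkB (l : List Int) (d : PySem.Dict Int Int) : checkA d l = checkB d l := by
  induction l with
  | nil => rfl
  | cons i rest ih =>
    simp only [checkA, checkB]
    by_cases h1 : d.getD i 0 = d.getD (i+1) 0
    · have hge : d.getD i 0 ≥ d.getD (i+1) 0 := le_of_eq h1.symm
      rw [if_neg (not_not_intro h1), if_neg (not_not_intro hge),
        if_neg (fun hc => hc.1 h1)]
      exact ih
    · by_cases h2 : d.getD i 0 = 2 * d.getD (i+1) 0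
      · rw [if_pos h1, if_neg (not_not_intro h2), if_neg (fun hc => hc.2 h2)]
        exact ih
      · rw [if_pos h1, if_pos h2, if_pos ⟨h1, h2⟩]

theorem prefixLen_le_length (v : Int) (l : List Int) : prefixLen v l ≤ l.length := by
  induction l with
  | nil => simp [prefixLen]
  | cons x xs ih => by_cases h : x = v <;> simp [prefixLen, h] <;> omega

theorem prefixLen_eq_length (v : Int) (l : List Int) :
    prefixLen v l = l.length ↔ ∀ y ∈ l, y = v := by
  induction l with
  | nil => simp [prefixLen]
  | cons x xs ih =>
    by_cases h : x = v
    · simp [prefixLen, h, ih]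
    · constructor
      · intro habs
        exfalso
        simp [prefixLen, h] at habs
      · intro hall
        exact absurd (hall x (by simp)) h

theorem prefixLen_append_of_lt (v : Int) (l t : List Int) (h : prefixLen v l < l.length) :
    prefixLen v (l ++ t) = prefixLen v l := by
  induction l with
  | nil => simp at h
  | cons x xs ih =>
    by_cases hx : x = v
    · simp [prefixLen, hx] at h ⊢
      exact ih (by omega)
    · simp [prefixLen, hx]

theorem rotA_eq (k : Nat) : ∀ (s : List Int) (f : Nat) (v : Int), s ≠ [] →
    s.getLastD 0 = v → prefixLen v s = k → k < s.length → k ≤ f →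
    rotA f s = s.drop k ++ s.take k := by
  induction k with
  | zero =>
    intro s f v hne hlast hpl _ _
    match f, s with
    | 0, s => simp [rotA]
    | f+1, [] => exact absurd rfl hne
    | f+1, x :: xs =>
      have hx : ¬ x = v := by
        intro h; simp [prefixLen, h] at hpl
      have hl : xs.getLastD x = v := by
        rw [List.getLastD_cons] at hlast; exact hlast
      simp only [rotA]
      rw [if_neg (fun h => hx (h.trans hl))]
      simp
  | succ k ih =>
    intro s f v hne hlast hpl hlt hf
    match f, s with
    | f+1, [] => exact absurd rfl hne
    | f+1, x :: xs =>
      have hx : x = v ∧ prefixLen v xs = k := by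
        by_cases h : x = v <;> simp [prefixLen, h] at hpl <;> simp [h, hpl]
      have hl : xs.getLastD x = v := by
        rw [List.getLastD_cons] at hlast; exact hlast
      have hklt : k < xs.length := by simp at hlt; omega
      have hstep : rotA (f+1) (x :: xs) = rotA f (xs ++ [x]) := by
        simp only [rotA]
        rw [if_pos (hx.1.trans hl.symm)]
      rw [hstep, ih (xs ++ [x]) f v (by simp) (by rw [List.getLastD_concat]; exact hx.1)
        (by rw [prefixLen_append_of_lt v xs [x] (hx.2 ▸ hklt)]; exact hx.2)
        (by simp; omega) (by omega)]
      rw [List.drop_append_of_le_length (by omega), List.take_append_of_le_length (by omega)]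
      simp

-- ===== VERDICT (by name: the statement is the Claim_ definition above) =====
theorem Segundo_pos_spec : Claim_equal_Segundo_pos := by
  intro seq _ hpre
  unfold Spec_Segundo_pos
  match seq with
  | [] => exact absurd rfl hpre.1
  | a :: as =>
    set v := as.getLastD a with hv
    set k := prefixLen v (a :: as) with hk
    have hkn : k < (a :: as).length := by
      rcases lt_or_eq_of_le (prefixLen_le_length v (a :: as)) with h | h
      · exact h
      · exfalso
        have hall := (prefixLen_eq_length v (a :: as)).1 h
        have hav : a = v := hall a (by simp)
        exact hpre.2 (by intro y hy; simpa [List.headI] using (hall y hy).trans hav.symm)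
    have hrot : rotA (a :: as).length (a :: as) = (a :: as).drop k ++ (a :: as).take k :=
      rotA_eq k (a :: as) (a :: as).length v (by simp) (by rw [List.getLastD_cons]) hk.symm hkn (le_of_lt hkn)
    have hlen : ((a :: as).drop k ++ (a :: as).take k).length = (a :: as).length := by
      simp
      omega
    obtain ⟨x, xs, hxs⟩ : ∃ x xs, (a :: as).drop k ++ (a :: as).take k = x :: xs := by
      cases hc : (a :: as).drop k ++ (a :: as).take k with
      | nil => exfalso; rw [hc] at hlen; simp at hlen
      | cons x xs => exact ⟨x, xs, rfl⟩
    have hdict : PySem.Dict.counter ((groupRuns (x :: xs)).map (fun r => (r.length : Int)))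
        = countRuns PySem.Dict.empty 1 x xs := by
      rw [countRuns_eq_foldl, ← PySem.Dict.foldl_insert_getD_add_one_eq_counter]
      congr 1
      have h3 := groupAux_lens xs x [x]
      simpa [groupRuns] using h3
    simp only [Segundo_pos, Segundo_pos_alt]
    rw [hrot, hxs, hdict, checkA_eq_checkB]
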